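-- pv_equiv track=rewrite | github.com/levyashvin/boot.dev | Learn to Code in Python/fantasy_quest/ch8_loops.py | meditate
-- ===== SOURCE A (Python) =====
-- def meditate(mana, max_mana, energy, energy_drinks):
--     while energy + mana < max_mana and energy_drinks > 0:
--             energy += 50
--             energy_drinks -= 1
--     while mana < max_mana and energy > 0:
--         mana += 1
--         energy -= 1
--
--     return mana, energy, energy_drinks
-- ===== SOURCE B (Python) =====
-- def meditate(mana, max_mana, energy, energy_drinks):
--     need = max_mana - mana - energy
--     if need > 0 and energy_drinks > 0:
--         k = min(-(-need // 50), energy_drinks)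
--         energy += 50 * k
--         energy_drinks -= k
--     t = min(max_mana - mana, energy)
--     if t > 0:
--         mana += t
--         energy -= t
--     return mana, energy, energy_drinks
-- ===== Notes on version B (the rewrite author's own statement) =====
-- stated objective: faster
-- what changed: Replaced the two unit-step while-loops (drink one energy drink at a time, convert energy to mana one point at a time) by closed-form arithmetic: a ceiling division gives the number of drinks consumed and a min gives the mana transferred.
import Mathlib
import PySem

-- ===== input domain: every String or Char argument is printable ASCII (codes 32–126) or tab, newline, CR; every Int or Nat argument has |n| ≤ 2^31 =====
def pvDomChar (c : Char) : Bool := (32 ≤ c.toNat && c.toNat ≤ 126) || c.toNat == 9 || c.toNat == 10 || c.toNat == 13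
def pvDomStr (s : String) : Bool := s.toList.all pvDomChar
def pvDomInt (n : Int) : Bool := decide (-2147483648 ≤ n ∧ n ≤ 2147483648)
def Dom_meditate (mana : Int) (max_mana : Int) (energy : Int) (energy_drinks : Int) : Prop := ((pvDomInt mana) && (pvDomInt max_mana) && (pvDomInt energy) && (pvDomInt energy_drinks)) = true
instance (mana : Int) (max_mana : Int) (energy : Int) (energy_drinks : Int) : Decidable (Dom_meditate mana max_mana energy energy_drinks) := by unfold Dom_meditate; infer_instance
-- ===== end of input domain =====

-- B replaces A's two unit-step while-loops by closed-form arithmetic (ceiling division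
-- for the drink count, min for the mana transfer): O(1) instead of O(max_mana + energy).

-- ===== PORT A =====
-- first while loop: drink energy drinks one at a time
def meditateLoop1 (mana : Int) (max_mana : Int) (energy : Int) (energy_drinks : Int) : Int × Int :=
  if energy + mana < max_mana ∧ energy_drinks > 0 then
    meditateLoop1 mana max_mana (energy + 50) (energy_drinks - 1)
  else (energy, energy_drinks)
termination_by energy_drinks.toNat
decreasing_by omega

-- second while loop: convert energy to mana one point at a time
def meditateLoop2 (mana : Int) (max_mana : Int) (energy : Int) : Int × Int :=
  if mana < max_mana ∧ energy > 0 then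
    meditateLoop2 (mana + 1) max_mana (energy - 1)
  else (mana, energy)
termination_by (max_mana - mana).toNat
decreasing_by omega

def meditate (mana : Int) (max_mana : Int) (energy : Int) (energy_drinks : Int) : List Int :=
  let p := meditateLoop1 mana max_mana energy energy_drinks
  let q := meditateLoop2 mana max_mana p.1
  [q.1, q.2, p.2]

-- ===== PORT B =====
def meditate_alt (mana : Int) (max_mana : Int) (energy : Int) (energy_drinks : Int) : List Int :=
  let need := max_mana - mana - energy
  -- k = number of drinks consumed: min(ceil(need/50), energy_drinks)  (Python -(-need // 50))
  let k := if need > 0 ∧ energy_drinks > 0 then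
             min (-(PySem.Int.floordiv (-need) 50)) energy_drinks else 0
  let energy := energy + 50 * k
  let energy_drinks := energy_drinks - k
  let t := min (max_mana - mana) energy
  let mana := if t > 0 then mana + t else mana
  let energy := if t > 0 then energy - t else energy
  [mana, energy, energy_drinks]

-- ===== PRECONDITION & SPEC =====
def Spec_meditate (mana : Int) (max_mana : Int) (energy : Int) (energy_drinks : Int) (out : List Int) : Prop := out = meditate_alt mana max_mana energy energy_drinks
instance (mana : Int) (max_mana : Int) (energy : Int) (energy_drinks : Int) (out : List Int) : Decidable (Spec_meditate mana max_mana energy energy_drinks out) := by unfold Spec_meditate; infer_instance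

-- ===== CLAIM (what is proved, stated in full; the proofs are below) =====
def Claim_equal_meditate : Prop := ∀ (mana : Int) (max_mana : Int) (energy : Int) (energy_drinks : Int), Dom_meditate mana max_mana energy energy_drinks → Spec_meditate mana max_mana energy energy_drinks (meditate mana max_mana energy energy_drinks)

-- ===== LEMMAS AND PROOFS =====
theorem meditateLoop1_spec (mana max_mana energy energy_drinks : Int) :
    meditateLoop1 mana max_mana energy energy_drinks =
      (if max_mana - mana - energy > 0 ∧ energy_drinks > 0 then
        let k := min (-((-(max_mana - mana - energy)) / 50)) energy_drinks
        (energy + 50 * k, energy_drinks - k)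
      else (energy, energy_drinks)) := by
  fun_induction meditateLoop1 with
  | case1 energy energy_drinks h ih =>
    rw [ih]
    split_ifs with h1 h2 <;> simp only [Prod.mk.injEq] <;> constructor <;> omega
  | case2 energy energy_drinks h =>
    split_ifs with h1
    · exact absurd ⟨by omega, h1.2⟩ h
    · rfl

theorem meditateLoop2_spec (mana max_mana energy : Int) :
    meditateLoop2 mana max_mana energy =
      (if mana < max_mana ∧ energy > 0 then
        let t := min (max_mana - mana) energy
        (mana + t, energy - t)
      else (mana, energy)) := by
  fun_induction meditateLoop2 with
  | case1 mana energy h ih =>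
    rw [ih]
    split_ifs <;> simp only [Prod.mk.injEq] <;> constructor <;> omega
  | case2 mana energy h =>
    rw [if_neg h]

-- ===== VERDICT (by name: the statement is the Claim_ definition above) =====
theorem meditate_spec : Claim_equal_meditate := by
  intro mana max_mana energy energy_drinks _
  show _ = _
  simp only [meditate, meditate_alt, meditateLoop1_spec, meditateLoop2_spec,
    PySem.Int.floordiv_eq_ediv_of_pos (a := -(max_mana - mana - energy)) (by norm_num : (0:Int) < 50)]
  split_ifs <;> simp only [List.cons.injEq, and_true, true_and] at * <;> omega
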